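-- pv_equiv track=rewrite | github.com/Arnab-Pachal1234/BOOLEAN-FUNCTION-MINIMIZOR- | quine-mccluskey.py | findminterms
-- ===== SOURCE A (Python) =====
-- def findminterms(a):
--     gaps = a.count('-')
--     if gaps == 0:
--         return [str(int(a, 2))]
--
--     temp = [a]  # Start with the original string containing '-'
--     for i in range(gaps):
--         new_temp = []
--         for item in temp:
--             index = item.find('-')
--             if index != -1:
--                 # Replace the first occurrence of '-' with '0' and '1'
--                 new_temp.append(item[:index] + '0' + item[index+1:])
--                 new_temp.append(item[:index] + '1' + item[index+1:])
--         temp = new_temp  # Update temp with the new list of strings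
--
--     # Convert binary strings to decimal and sort
--     ans = [str(int(x, 2)) for x in temp]
--     ans.sort()
--     return ans
-- ===== SOURCE B (Python) =====
-- def findminterms(a):
--     positions = [i for i, c in enumerate(a) if c == '-']
--     k = len(positions)
--     ans = []
--     for n in range(1 << k):
--         chars = list(a)
--         for j, pos in enumerate(positions):
--             chars[pos] = '1' if (n >> (k - 1 - j)) & 1 else '0'
--         ans.append(str(int(''.join(chars), 2)))
--     ans.sort()
--     return ans
-- ===== Notes on version B (the rewrite author's own statement) =====
-- stated objective: alternative
-- what changed: Replaces A's breadth-first list rewriting (gaps rounds, each rescanning every partial string with find and slicing) by a direct enumeration: collect the wildcard positions once, then for each n in range(2**k) decode n's bits straight into those positions; no intermediate generations of strings are kept.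
import Mathlib
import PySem

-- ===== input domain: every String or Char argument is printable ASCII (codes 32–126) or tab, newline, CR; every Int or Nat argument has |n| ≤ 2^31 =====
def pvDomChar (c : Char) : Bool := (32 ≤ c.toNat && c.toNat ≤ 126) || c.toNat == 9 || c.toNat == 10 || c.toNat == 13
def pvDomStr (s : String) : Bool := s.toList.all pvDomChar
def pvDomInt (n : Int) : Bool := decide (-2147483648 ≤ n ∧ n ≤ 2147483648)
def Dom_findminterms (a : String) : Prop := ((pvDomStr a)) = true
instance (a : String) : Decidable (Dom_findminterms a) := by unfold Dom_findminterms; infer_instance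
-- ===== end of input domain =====

-- B replaces A's breadth-first generation rewriting (one round per wildcard) by a single direct
-- enumeration of the wildcard positions' bit assignments; objective: alternative (same asymptotic cost).

-- ===== PORT A =====
def findminterms (a : String) : List String :=
  let gaps := PySem.Str.count a "-"
  if gaps = 0 then
    [PySem.Int.toStr ((PySem.Int.ofCharsBase? a.toList 2).getD 0)]
  else
    let temp := (PySem.List.pyRange 0 (gaps : Int) 1).foldl (fun temp _ =>
      temp.foldl (fun new_temp item =>
        let index := PySem.Chars.find item ['-']
        if index ≠ -1 then
          (new_temp ++ [PySem.List.slice item none (some index) ++ '0' :: PySem.List.slice item (some (index + 1)) none])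
            ++ [PySem.List.slice item none (some index) ++ '1' :: PySem.List.slice item (some (index + 1)) none]
        else new_temp) []) [a.toList]
    let ans := temp.map (fun x => PySem.Int.toStr ((PySem.Int.ofCharsBase? x 2).getD 0))
    PySem.List.sorted ans (fun s => s) false

-- ===== PORT B =====
def findminterms_alt (a : String) : List String :=
  let positions := ((PySem.List.enumerate a.toList 0).filter (fun p => p.2 = '-')).map (fun p => p.1)
  let k := positions.length
  let ans := (PySem.List.pyRange 0 ((1 : Int) <<< k) 1).map (fun n =>
    let chars := (PySem.List.enumerate positions 0).foldl (fun chars jp =>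
      chars.set jp.2.toNat
        (if PySem.Int.band (n >>> ((k : Int) - 1 - jp.1).toNat) 1 ≠ 0 then '1' else '0')) a.toList
    PySem.Int.toStr ((PySem.Int.ofCharsBase? chars 2).getD 0))
  PySem.List.sorted ans (fun s => s) false

-- ===== PRECONDITION & SPEC =====
-- Pre_ excludes exactly the inputs on which Python A raises ValueError: int(x, 2) must succeed on
-- every expansion of a, which holds iff it succeeds on the all-zeros and the all-ones expansions.
def Pre_findminterms (a : String) : Prop :=
  (PySem.Int.ofCharsBase? (a.toList.map (fun c => if c = '-' then '0' else c)) 2).isSome = true ∧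
  (PySem.Int.ofCharsBase? (a.toList.map (fun c => if c = '-' then '1' else c)) 2).isSome = true
instance (a : String) : Decidable (Pre_findminterms a) := by unfold Pre_findminterms; infer_instance
def pvWitness_findminterms : String := "1-0"

def Spec_findminterms (a : String) (out : List String) : Prop := out = findminterms_alt a
instance (a : String) (out : List String) : Decidable (Spec_findminterms a out) := by unfold Spec_findminterms; infer_instance

-- ===== CLAIM (what is proved, stated in full; the proofs are below) =====
def Claim_equal_findminterms : Prop := ∀ (a : String), Dom_findminterms a → Pre_findminterms a → Spec_findminterms a (findminterms a)

-- ===== LEMMAS AND PROOFS =====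

-- the binary-digit strings of length k, in A's and B's common (MSB-first) order
def allBits : Nat → List (List Char)
  | 0 => [[]]
  | k + 1 => (allBits k).map (fun bs => '0' :: bs) ++ (allBits k).map (fun bs => '1' :: bs)

-- write the given bits at the given positions
def fill : List Char → List Nat → List Char → List Char
  | cs, _, [] => cs
  | cs, [], _ :: _ => cs
  | cs, p :: ps, b :: bs => fill (cs.set p b) ps bs

-- the positions of '-' in a char list, in increasing order
def dashPos : List Char → List Nat
  | [] => []
  | c :: cs => if c = '-' then 0 :: (dashPos cs).map (· + 1) else (dashPos cs).map (· + 1)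

-- bit e of n, as a character
def bitChar (n : Int) (e : Int) : Char :=
  if PySem.Int.band (n >>> e.toNat) 1 ≠ 0 then '1' else '0'

-- the k bits of n, most significant first
def decodeBits (k : Nat) (n : Int) : List Char :=
  (List.range k).map (fun (j : Nat) => bitChar n ((k : Int) - 1 - (j : Int)))

-- A's per-item step, as a flat list
def stepItem (item : List Char) : List (List Char) :=
  let index := PySem.Chars.find item ['-']
  if index ≠ -1 then
    [PySem.List.slice item none (some index) ++ '0' :: PySem.List.slice item (some (index + 1)) none,
     PySem.List.slice item none (some index) ++ '1' :: PySem.List.slice item (some (index + 1)) none]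
  else []

-- dashPos basics -------------------------------------------------------------

lemma dashPos_lt_length (cs : List Char) : ∀ i ∈ dashPos cs, i < cs.length := by
  induction cs with
  | nil => simp [dashPos]
  | cons c cs ih =>
    intro i hi
    simp only [dashPos] at hi
    split at hi
    · rcases List.mem_cons.mp hi with rfl | h
      · simp
      · obtain ⟨j, hj, rfl⟩ := List.mem_map.mp h
        simpa using Nat.succ_lt_succ (ih j hj)
    · obtain ⟨j, hj, rfl⟩ := List.mem_map.mp hi
      simpa using Nat.succ_lt_succ (ih j hj)

lemma dashPos_head_dash (cs : List Char) (i : Nat) (ps : List Nat) (h : dashPos cs = i :: ps) :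
    cs[i]? = some '-' := by
  induction cs generalizing i ps with
  | nil => simp [dashPos] at h
  | cons c cs ih =>
    simp only [dashPos] at h
    split at h
    · next hc =>
      obtain ⟨rfl, -⟩ := List.cons_eq_cons.mp h
      simp [hc]
    · rcases hd : dashPos cs with _ | ⟨j, qs⟩
      · rw [hd] at h; simp at h
      · rw [hd] at h; simp only [List.map_cons] at h
        obtain ⟨rfl, -⟩ := List.cons_eq_cons.mp h
        simpa using ih j qs hd

lemma dashPos_head_min (cs : List Char) (i : Nat) (ps : List Nat) (h : dashPos cs = i :: ps) :
    ∀ j < i, cs[j]? ≠ some '-' := by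
  induction cs generalizing i ps with
  | nil => simp [dashPos] at h
  | cons c cs ih =>
    simp only [dashPos] at h
    split at h
    · obtain ⟨rfl, -⟩ := List.cons_eq_cons.mp h; omega
    · next hc =>
      rcases hd : dashPos cs with _ | ⟨j', qs⟩
      · rw [hd] at h; simp at h
      · rw [hd] at h; simp only [List.map_cons] at h
        obtain ⟨rfl, -⟩ := List.cons_eq_cons.mp h
        intro j hj
        cases j with
        | zero => simpa using hc
        | succ j => simpa using ih j' qs hd j (by omega)

lemma dashPos_set (cs : List Char) (i : Nat) (ps : List Nat) (b : Char) (hb : b ≠ '-')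
    (h : dashPos cs = i :: ps) : dashPos (cs.set i b) = ps := by
  induction cs generalizing i ps with
  | nil => simp [dashPos] at h
  | cons c cs ih =>
    simp only [dashPos] at h
    split at h
    · obtain ⟨rfl, rfl⟩ := List.cons_eq_cons.mp h
      simp [dashPos, hb]
    · next hc =>
      rcases hd : dashPos cs with _ | ⟨j', qs⟩
      · rw [hd] at h; simp at h
      · rw [hd] at h; simp only [List.map_cons] at h
        obtain ⟨rfl, rfl⟩ := List.cons_eq_cons.mp h
        simp [List.set, dashPos, hc, ih j' qs hd]

lemma count_go_eq (fuel : Nat) : ∀ (l : List Char) (acc : Nat), l.length ≤ fuel →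
    PySem.Chars.count.go ['-'] fuel l acc = acc + (dashPos l).length := by
  induction fuel with
  | zero =>
    intro l acc hl
    interval_cases h : l.length
    · rw [List.length_eq_zero_iff.mp h]
      simp [PySem.Chars.count.go, dashPos]
  | succ fuel ih =>
    intro l acc hl
    cases l with
    | nil => simp [PySem.Chars.count.go, dashPos]
    | cons c cs =>
      rw [PySem.Chars.count.go]
      by_cases hc : c = '-'
      · have : List.isPrefixOf ['-'] (c :: cs) = true := by simp [List.isPrefixOf, hc]
        simp only [this, if_pos]
        simp only [List.length_cons] at hl
        simp [List.drop, ih cs (acc+1) (by omega), dashPos, hc, Nat.add_comm, Nat.add_left_comm]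
      · have : List.isPrefixOf ['-'] (c :: cs) = true ↔ False := by simp [List.isPrefixOf]; exact fun h => hc h.symm
        simp only [List.length_cons] at hl
        rw [if_neg (by simp [this])]
        simp [ih cs acc (by omega), dashPos, hc]

lemma count_eq_dashPos (cs : List Char) : PySem.Chars.count cs ['-'] = (dashPos cs).length := by
  rw [PySem.Chars.count]
  simp [count_go_eq cs.length cs 0 le_rfl]

lemma singleton_prefix_iff (a : Char) (l : List Char) : [a] <+: l ↔ l.head? = some a := by
  constructor
  · rintro ⟨t, rfl⟩; rfl
  · intro h; cases l with
    | nil => simp at h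
    | cons b t => simp at h; subst h; exact ⟨t, rfl⟩

lemma find_of_first (cs : List Char) (i : Nat) (ps : List Nat) (h : dashPos cs = i :: ps) :
    PySem.Chars.find cs ['-'] = (i : Int) := by
  have hmem : '-' ∈ cs := by
    have := dashPos_head_dash cs i ps h
    exact List.mem_of_getElem? this
  have hpos : 0 ≤ PySem.Chars.find cs ['-'] :=
    (PySem.Chars.find_nonneg_iff cs ['-']).mpr ((List.singleton_infix_iff _ _).mpr hmem)
  obtain ⟨hpre, hmin⟩ := PySem.Chars.find_spec hpos
  set t := (PySem.Chars.find cs ['-']).toNat with ht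
  have hdash_t : cs[t]? = some '-' := by
    rw [← List.head?_drop]
    exact (singleton_prefix_iff _ _).mp hpre
  have h1 : ¬ t < i := fun hlt => (dashPos_head_min cs i ps h t hlt) hdash_t
  have h2 : ¬ i < t := by
    intro hlt
    exact hmin i hlt ((singleton_prefix_iff _ _).mpr (by rw [List.head?_drop]; exact dashPos_head_dash cs i ps h))
  have : t = i := by omega
  omega

lemma slice_set_eq (cs : List Char) (i : Nat) (ps : List Nat) (h : dashPos cs = i :: ps) (b : Char) :
    (PySem.List.slice cs none (some ((i : Int))) ++ b :: PySem.List.slice cs (some ((i : Int) + 1)) none)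
      = cs.set i b := by
  have hi : i < cs.length := dashPos_lt_length cs i (by rw [h]; exact List.mem_cons_self)
  have : ((i : Int) + 1) = ((i + 1 : Nat) : Int) := by push_cast; ring
  rw [this, PySem.List.slice_to_natCast, PySem.List.slice_from_natCast,
      List.set_eq_take_append_cons_drop]
  simp [hi]

lemma stepItem_of_dash (cs : List Char) (i : Nat) (ps : List Nat) (h : dashPos cs = i :: ps) :
    stepItem cs = [cs.set i '0', cs.set i '1'] := by
  have hf := find_of_first cs i ps h
  simp only [stepItem, hf]
  rw [if_pos (by omega)]
  rw [slice_set_eq cs i ps h '0', slice_set_eq cs i ps h '1']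

lemma inner_foldl_eq (l : List (List Char)) (acc : List (List Char)) :
    l.foldl (fun new_temp item =>
      let index := PySem.Chars.find item ['-']
      if index ≠ -1 then
        (new_temp ++ [PySem.List.slice item none (some index) ++ '0' :: PySem.List.slice item (some (index + 1)) none])
          ++ [PySem.List.slice item none (some index) ++ '1' :: PySem.List.slice item (some (index + 1)) none]
      else new_temp) acc = acc ++ l.flatMap stepItem := by
  rw [PySem.List.foldl_congr_mem l _ (fun acc x => acc ++ stepItem x) acc ?_]
  · exact PySem.List.foldl_append_eq_flatMap stepItem l acc
  · intro acc x _
    simp only [stepItem]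
    split
    · simp
    · simp

lemma foldl_const_iterate {α β : Type} (F : β → β) (l : List α) (init : β) :
    l.foldl (fun t _ => F t) init = F^[l.length] init := by
  induction l generalizing init with
  | nil => rfl
  | cons x xs ih => simp [List.foldl_cons, ih, Function.iterate_succ_apply]

lemma iterate_flatMap_append (m : Nat) (l1 l2 : List (List Char)) :
    (fun t => t.flatMap stepItem)^[m] (l1 ++ l2)
      = (fun t => t.flatMap stepItem)^[m] l1 ++ (fun t => t.flatMap stepItem)^[m] l2 := by
  induction m generalizing l1 l2 with
  | zero => rfl
  | succ m ih => simp [Function.iterate_succ_apply, List.flatMap_append, ih]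

lemma iterate_eq_allBits : ∀ (g : Nat) (cs : List Char), (dashPos cs).length = g →
    (fun t => t.flatMap stepItem)^[g] [cs] = (allBits g).map (fun bs => fill cs (dashPos cs) bs) := by
  intro g
  induction g with
  | zero =>
    intro cs h
    rw [List.length_eq_zero_iff.mp h]
    simp [allBits, fill]
  | succ g ih =>
    intro cs h
    rcases hd : dashPos cs with _ | ⟨i, ps⟩
    · rw [hd] at h; simp at h
    · rw [hd] at h
      simp only [List.length_cons, Nat.succ.injEq] at h
      have h0 : dashPos (cs.set i '0') = ps := dashPos_set cs i ps '0' (by decide) hd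
      have h1 : dashPos (cs.set i '1') = ps := dashPos_set cs i ps '1' (by decide) hd
      rw [Function.iterate_succ_apply]
      have hstep : List.flatMap stepItem [cs] = [cs.set i '0'] ++ [cs.set i '1'] := by
        simp [stepItem_of_dash cs i ps hd]
      rw [hstep, iterate_flatMap_append, ih (cs.set i '0') (by rw [h0]; omega),
          ih (cs.set i '1') (by rw [h1]; omega), h0, h1]
      simp only [allBits, List.map_append, List.map_map]
      congr 1

lemma positions_eq(cs : List Char) : ∀ (s : Nat),
    (((PySem.List.enumerate cs (s : Int)).filter (fun p => p.2 = '-')).map (fun p => p.1))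
      = (dashPos cs).map (fun i : Nat => ((s + i : Nat) : Int)) := by
  induction cs with
  | nil => intro s; simp [PySem.List.enumerate_nil, dashPos]
  | cons c cs ih =>
    intro s
    rw [PySem.List.enumerate_cons, List.filter_cons]
    have hcast : ((s : Int) + 1) = ((s + 1 : Nat) : Int) := by push_cast; ring
    rw [hcast]
    by_cases hc : c = '-'
    · rw [if_pos (by simpa using hc), List.map_cons, ih (s + 1)]
      simp only [dashPos, if_pos hc, List.map_cons, List.map_map]
      refine List.cons_eq_cons.mpr ⟨by simp, List.map_congr_left fun i _ => by simp [Function.comp]; omega⟩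
    · rw [if_neg (by simpa using hc), ih (s + 1)]
      simp only [dashPos, if_neg hc, List.map_map]
      exact List.map_congr_left fun i _ => by simp [Function.comp]; omega

lemma portFill_eq (n : Int) (k : Nat) : ∀ (ps : List Nat) (cs : List Char) (s : Nat),
    (PySem.List.enumerate (ps.map (fun i : Nat => (i : Int))) (s : Int)).foldl (fun chars jp =>
        chars.set jp.2.toNat
          (if PySem.Int.band (n >>> ((k : Int) - 1 - jp.1).toNat) 1 ≠ 0 then '1' else '0')) cs
      = fill cs ps ((List.range ps.length).map (fun j => bitChar n ((k : Int) - 1 - ((s + j : Nat) : Int)))) := by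
  intro ps
  induction ps with
  | nil => intro cs s; simp [PySem.List.enumerate_nil, fill]
  | cons p ps ih =>
    intro cs s
    rw [List.map_cons, PySem.List.enumerate_cons, List.foldl_cons]
    have h1 : ((s : Int) + 1) = ((s + 1 : Nat) : Int) := by push_cast; ring
    rw [h1, ih _ (s + 1)]
    have h2 : List.range (p :: ps).length = 0 :: (List.range ps.length).map (· + 1) := by
      simp [List.range_succ_eq_map]
    rw [h2, List.map_cons, List.map_map]
    have h3 : ((p : Int)).toNat = p := by omega
    simp only [fill, h3]
    congr 1
    refine List.map_congr_left fun x _ => ?_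
    simp only [Function.comp]
    congr 3
    omega

lemma natCast_shiftRight(m k : Nat) : ((m : Int) >>> k) = ((m >>> k : Nat) : Int) := rfl

lemma bitChar_natCast (m e : Nat) : bitChar (m : Int) (e : Int) = if (m >>> e) % 2 = 0 then '0' else '1' := by
  have he : ((e : Int)).toNat = e := by omega
  have hb : PySem.Int.band ((m >>> e : Nat) : Int) 1 = (((m >>> e) &&& 1 : Nat) : Int) := by
    exact_mod_cast PySem.Int.band_natCast (m >>> e) 1
  simp only [bitChar, he, natCast_shiftRight, hb, Nat.and_one_is_mod, ne_eq, Int.natCast_eq_zero]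
  by_cases h : (m >>> e) % 2 = 0
  · simp [h]
  · simp [h]

lemma bitChar_high_zero (k m : Nat) (hm : m < 2 ^ k) : bitChar (m : Int) (k : Int) = '0' := by
  rw [bitChar_natCast]
  have h : m >>> k = 0 := by rw [Nat.shiftRight_eq_div_pow, Nat.div_eq_of_lt hm]
  simp [h]

lemma bitChar_high_one (k m : Nat) (hm : m < 2 ^ k) : bitChar ((2 ^ k + m : Nat) : Int) (k : Int) = '1' := by
  rw [bitChar_natCast]
  have h : (2 ^ k + m) >>> k = 1 := by
    rw [Nat.shiftRight_eq_div_pow, Nat.add_comm, Nat.add_div_right m (Nat.two_pow_pos k),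
        Nat.div_eq_of_lt hm]
  simp [h]

lemma decodeBits_add_pow (k m : Nat) (_hm : m < 2 ^ k) :
    decodeBits k ((2 ^ k + m : Nat) : Int) = decodeBits k (m : Int) := by
  apply List.map_congr_left
  intro j hj
  rw [List.mem_range] at hj
  have he : ((k : Int) - 1 - (j : Int)) = ((k - 1 - j : Nat) : Int) := by omega
  rw [he, bitChar_natCast, bitChar_natCast]
  set d := k - 1 - j with hd
  rw [Nat.shiftRight_eq_div_pow, Nat.shiftRight_eq_div_pow]
  have hsplit : (2 ^ k + m) / 2 ^ d = 2 ^ (k - d) + m / 2 ^ d := by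
    have h2 : 2 ^ k = 2 ^ (k - d) * 2 ^ d := by rw [← pow_add]; congr 1; omega
    rw [h2, Nat.add_comm, Nat.add_mul_div_right _ _ (Nat.two_pow_pos d), Nat.add_comm]
  rw [hsplit]
  have heven : 2 ^ (k - d) % 2 = 0 := by
    have h3 : k - d = (k - d - 1) + 1 := by omega
    rw [h3, pow_succ]
    exact Nat.mul_mod_left _ 2
  have hmod : (2 ^ (k - d) + m / 2 ^ d) % 2 = (m / 2 ^ d) % 2 := by omega
  rw [hmod]

lemma decodeBits_succ(k : Nat) (n : Int) :
    decodeBits (k + 1) n = bitChar n (k : Int) :: decodeBits k n := by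
  rw [decodeBits, decodeBits, List.range_succ_eq_map, List.map_cons, List.map_map]
  refine List.cons_eq_cons.mpr ⟨?_, ?_⟩
  · congr 1
    push_cast
    ring
  · refine List.map_congr_left fun j _ => ?_
    simp only [Function.comp_apply]
    congr 1
    push_cast
    ring

lemma range_map_decode: ∀ (k : Nat),
    (List.range (2 ^ k)).map (fun (m : Nat) => decodeBits k (m : Int)) = allBits k := by
  intro k
  induction k with
  | zero => simp [allBits, decodeBits]
  | succ k ih =>
    have hsplit : (2 : Nat) ^ (k + 1) = 2 ^ k + 2 ^ k := by ring
    rw [hsplit, List.range_add, List.map_append]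
    simp only [allBits, ← ih, List.map_map]
    congr 1
    · refine List.map_congr_left fun m hm => ?_
      rw [List.mem_range] at hm
      simp only [Function.comp_apply]
      rw [decodeBits_succ, bitChar_high_zero k m hm]
    · refine List.map_congr_left fun m hm => ?_
      rw [List.mem_range] at hm
      simp only [Function.comp_apply]
      rw [decodeBits_succ, bitChar_high_one k m hm, decodeBits_add_pow k m hm]

-- assembly -------------------------------------------------------------------


def fstr (x : List Char) : String := PySem.Int.toStr ((PySem.Int.ofCharsBase? x 2).getD 0)

lemma alt_eq (a : String) :
    findminterms_alt a = PySem.List.sorted (((allBits (dashPos a.toList).length).map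
      (fun bs => fill a.toList (dashPos a.toList) bs)).map fstr) (fun s => s) false := by
  simp only [findminterms_alt]
  congr 1
  have hpos : ((PySem.List.enumerate a.toList 0).filter (fun p => p.2 = '-')).map (fun p => p.1)
      = (dashPos a.toList).map (fun i : Nat => (i : Int)) := by
    have h := positions_eq a.toList 0
    norm_num at h
    exact h
  rw [hpos, List.length_map]
  have hshift : (1 : Int) <<< (dashPos a.toList).length = ((2 ^ (dashPos a.toList).length : Nat) : Int) := by
    rw [Int.shiftLeft_eq]
    push_cast
    ring
  rw [hshift, PySem.List.pyRange_zero_natCast, List.map_map]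
  rw [← range_map_decode, List.map_map, List.map_map]
  apply List.map_congr_left
  intro m hm
  rw [List.mem_range] at hm
  simp only [Function.comp_apply]
  have h := portFill_eq ((m : Int)) (dashPos a.toList).length (dashPos a.toList) a.toList 0
  simp only [Nat.cast_zero, Nat.zero_add] at h
  rw [h]
  rfl

lemma a_eq (a : String) :
    findminterms a = PySem.List.sorted (((allBits (dashPos a.toList).length).map
      (fun bs => fill a.toList (dashPos a.toList) bs)).map fstr) (fun s => s) false := by
  simp only [findminterms]
  have hcnt : PySem.Str.count a "-" = (dashPos a.toList).length := by
    rw [PySem.Str.count_eq]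
    exact count_eq_dashPos a.toList
  rw [hcnt]
  rcases hd : dashPos a.toList with _ | ⟨i, ps⟩
  · simp only [List.length_nil]
    rw [if_true]
    simp only [allBits, fill, fstr, List.map_cons, List.map_nil]
    exact (PySem.List.sorted_eq_self_of_pairwise _ _ (List.pairwise_singleton _ _)).symm
  · simp only [List.length_cons]
    rw [if_neg (Nat.succ_ne_zero _)]
    congr 1
    congr 1
    rw [PySem.List.foldl_congr_mem _ _ (fun (t : List (List Char)) (_ : Int) => t.flatMap stepItem) _
        (fun acc x _ => by rw [inner_foldl_eq]; simp)]
    rw [foldl_const_iterate]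
    have hlen : (PySem.List.pyRange 0 ((ps.length + 1 : Nat) : Int) 1).length = ps.length + 1 := by
      rw [PySem.List.pyRange_zero_natCast]
      simp
    rw [hlen]
    have := iterate_eq_allBits (ps.length + 1) a.toList (by rw [hd]; simp)
    rw [hd] at this
    exact this

lemma ports_eq (a : String) : findminterms a = findminterms_alt a := by
  rw [a_eq, alt_eq]

-- ===== VERDICT =====
theorem findminterms_spec : Claim_equal_findminterms := by
  intro a _ _
  unfold Spec_findminterms
  exact ports_eq a
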